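-- pv_equiv track=rewrite | github.com/astroupia/leetcode-solutions | 1100. Find K-Length Substrings With No Repeated Characters.py | kLengthString
-- ===== SOURCE A (Python) =====
-- def kLengthString(s, k):
--     left, result = 0, 0
--     freq = {}
--
--     for right in range(len(s)):
--         freq[s[right]] = freq.get(s[right], 0) + 1
--
--         while freq[s[right]] > 1 or (right - left + 1) > k:
--             freq[s[left]] -= 1
--             if freq[s[left]] == 0:
--                 del freq[s[left]]
--             left += 1
--
--         if (right - left + 1) == k:
--             result += 1
--
--     return result
-- ===== SOURCE B (Python) =====
-- def kLengthString(s, k):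
--     # Brute force: count start positions whose k-length window fits in s and has all-distinct chars.
--     return sum(1 for i in range(len(s)) if i + k <= len(s) and len(set(s[i:i + k])) == k)
-- ===== Notes on version B (the rewrite author's own statement) =====
-- stated objective: simpler
-- what changed: Replaces the incremental sliding-window frequency dict with a one-line brute-force scan that tests each k-length window independently via len(set(window)) == k.
import Mathlib
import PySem

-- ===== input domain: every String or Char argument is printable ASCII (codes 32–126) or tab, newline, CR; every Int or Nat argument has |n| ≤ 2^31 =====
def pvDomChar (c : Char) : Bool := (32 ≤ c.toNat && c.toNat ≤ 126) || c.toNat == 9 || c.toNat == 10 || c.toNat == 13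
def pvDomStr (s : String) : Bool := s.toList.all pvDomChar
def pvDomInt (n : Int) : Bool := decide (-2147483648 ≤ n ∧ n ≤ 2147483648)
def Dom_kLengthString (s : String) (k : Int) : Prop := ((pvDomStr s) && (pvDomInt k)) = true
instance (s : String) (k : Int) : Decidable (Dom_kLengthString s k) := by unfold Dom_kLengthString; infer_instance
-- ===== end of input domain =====

-- B replaces A's incremental sliding-window frequency dict by a brute-force scan that tests each
-- k-length window independently (objective: simpler).

-- ===== PORT A =====
-- The inner `while` loop of A, as fuel recursion (fuel = len(s)+1 always suffices: `left` stops
-- at `right` at the latest when k ≥ 1).  `freq[s[right]]` / `freq[s[left]]` are ported as getD: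
-- under Pre_ (k ≥ 1) those keys are always present, so the lookup never raises and getD is exact.
def kLengthShrink (fuel : Nat) (cs : List Char) (k : Int) (right : Nat)
    (freq : PySem.Dict Char Int) (left : Nat) : PySem.Dict Char Int × Nat :=
  match fuel with
  | 0 => (freq, left)
  | fuel + 1 =>
    if freq.getD (cs.getD right ' ') 0 > 1 ∨ ((right : Int) - (left : Int) + 1 > k) then
      let cl := cs.getD left ' '
      let freq1 := freq.insert cl (freq.getD cl 0 - 1)
      let freq2 := if freq1.getD cl 0 = 0 then freq1.erase cl else freq1
      kLengthShrink fuel cs k right freq2 (left + 1)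
    else (freq, left)

-- the body of A's `for right in range(len(s))` loop; state = (left, result, freq)
def kLengthStep (cs : List Char) (k : Int) (st : Nat × Int × PySem.Dict Char Int) (right : Nat) :
    Nat × Int × PySem.Dict Char Int :=
  let c := cs.getD right ' '
  let freq := st.2.2.insert c (st.2.2.getD c 0 + 1)
  let p := kLengthShrink (cs.length + 1) cs k right freq st.1
  let result := if (right : Int) - (p.2 : Int) + 1 = k then st.2.1 + 1 else st.2.1
  (p.2, result, p.1)

def kLengthString (s : String) (k : Int) : Int :=
  ((List.range s.toList.length).foldl (kLengthStep s.toList k)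
    (0, 0, PySem.Dict.empty)).2.1

-- ===== PORT B =====
-- sum(1 for i in range(len(s)) if i + k <= len(s) and len(set(s[i:i+k])) == k)
def kLengthString_alt (s : String) (k : Int) : Int :=
  (PySem.List.pyRange 0 (s.toList.length : Int) 1).foldl
    (fun count i =>
      if i + k ≤ (s.toList.length : Int) ∧
         ((PySem.Set.ofList (PySem.List.slice s.toList (some i) (some (i + k)))).length : Int) = k
      then count + 1 else count) 0

-- ===== PRECONDITION & SPEC =====
-- Pre_ excludes exactly the inputs on which A raises KeyError: every nonempty string with k ≤ 0
-- (the while loop deletes s[right]'s dict entry and then re-reads it).  On every input where A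
-- returns (k ≥ 1, or any k on the empty string) B matches A.
def Pre_kLengthString (s : String) (k : Int) : Prop := 1 ≤ k ∨ s = ""
instance (s : String) (k : Int) : Decidable (Pre_kLengthString s k) := by
  unfold Pre_kLengthString; infer_instance
def pvWitness_kLengthString : String × Int := ("abcab", 3)

def Spec_kLengthString (s : String) (k : Int) (out : Int) : Prop := out = kLengthString_alt s k
instance (s : String) (k : Int) (out : Int) : Decidable (Spec_kLengthString s k out) := by
  unfold Spec_kLengthString; infer_instance

-- ===== CLAIM (what is proved, stated in full; the proofs are below) =====
def Claim_equal_kLengthString : Prop := ∀ (s : String) (k : Int), Dom_kLengthString s k →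
  Pre_kLengthString s k → Spec_kLengthString s k (kLengthString s k)

-- ===== LEMMAS AND PROOFS =====

-- the window of characters at positions [l, r) of cs
def pvWin (cs : List Char) (l r : Nat) : List Char := (cs.drop l).take (r - l)

-- "the window [l, r) is admissible": at most K long and duplicate-free
def pvGood (cs : List Char) (K : Nat) (l r : Nat) : Prop := r - l ≤ K ∧ (pvWin cs l r).Nodup

-- A counts position r iff the K-window ending at r exists and is duplicate-free
def pvValid (cs : List Char) (K : Nat) (r : Nat) : Bool :=
  decide (K ≤ r + 1) && decide ((pvWin cs (r + 1 - K) (r + 1)).Nodup)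

-- B counts start i iff the K-window starting at i is duplicate-free
def pvValidB (cs : List Char) (K : Nat) (i : Nat) : Bool := decide ((pvWin cs i (i + K)).Nodup)

-- A's loop invariant after processing rights 0..m-1
def pvInv (cs : List Char) (K : Nat) (m left : Nat) (freq : PySem.Dict Char Int) : Prop :=
  left ≤ m ∧ m - left ≤ K ∧ (pvWin cs left m).Nodup ∧
  (∀ c, freq.getD c 0 = ((pvWin cs left m).count c : Int)) ∧
  (∀ l, l < left → ¬ pvGood cs K l m)

lemma pvWin_length (cs : List Char) (l r : Nat) :
    (pvWin cs l r).length = min (r - l) (cs.length - l) := by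
  simp [pvWin]

lemma pvWin_concat (cs : List Char) (l r : Nat) (hr : r < cs.length) (hl : l ≤ r) :
    pvWin cs l (r + 1) = pvWin cs l r ++ [cs.getD r ' '] := by
  unfold pvWin
  rw [show r + 1 - l = (r - l) + 1 by omega, List.take_add_one]
  congr 1
  have h : r - l < (cs.drop l).length := by simp; omega
  rw [List.getElem?_eq_getElem h]
  simp [List.getElem_drop, List.getD_eq_getElem?_getD, List.getElem?_eq_getElem hr]
  congr 1; omega

lemma pvWin_cons (cs : List Char) (l r : Nat) (hl : l < r) (hln : l < cs.length) :
    pvWin cs l r = cs.getD l ' ' :: pvWin cs (l + 1) r := by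
  unfold pvWin
  rw [List.drop_eq_getElem_cons hln, show r - l = (r - (l + 1)) + 1 by omega,
    List.take_succ_cons, List.getD_eq_getElem?_getD, List.getElem?_eq_getElem hln]
  rfl

lemma pvFind_filter_ne (l : List (Char × Int)) (k j : Char) (h : j ≠ k) :
    List.find? (fun p => p.1 == j) (l.filter (fun p => !(p.1 == k))) =
      List.find? (fun p => p.1 == j) l := by
  induction l with
  | nil => rfl
  | cons p rest ih =>
      by_cases hp : p.1 = j
      · simp [hp, h]
      · by_cases hk : p.1 = k <;> simp [hp, hk, ih, Ne.symm h]

lemma pvGetD_erase_of_ne (d : PySem.Dict Char Int) (k j : Char) (h : j ≠ k) :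
    (d.erase k).getD j 0 = d.getD j 0 := by
  rw [PySem.Dict.getD_eq_get?_getD, PySem.Dict.getD_eq_get?_getD]
  simp only [PySem.Dict.erase, PySem.Dict.get?]
  rw [pvFind_filter_ne d.items k j h]

lemma pvGetD_erase_self (d : PySem.Dict Char Int) (k : Char) : (d.erase k).getD k 0 = 0 := by
  apply PySem.Dict.getD_of_get?_eq_none
  simp [PySem.Dict.erase, PySem.Dict.get?]

lemma pvCond_iff (cs : List Char) (k : Int) (hk : 1 ≤ k) (r left : Nat)
    (freq : PySem.Dict Char Int) (hr : r < cs.length) (hl : left ≤ r)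
    (hnd : (pvWin cs left r).Nodup)
    (hfreq : ∀ c, PySem.Dict.getD freq c 0 = ((pvWin cs left (r + 1)).count c : Int)) :
    (PySem.Dict.getD freq (cs.getD r ' ') 0 > 1 ∨ (r : Int) - (left : Int) + 1 > k) ↔
      ¬ pvGood cs k.toNat left (r + 1) := by
  have hw := pvWin_concat cs left r hr hl
  have hcount : (pvWin cs left (r + 1)).count (cs.getD r ' ') =
      (pvWin cs left r).count (cs.getD r ' ') + 1 := by
    rw [hw]; simp
  have hg : pvGood cs k.toNat left (r + 1) ↔
      (r + 1 - left ≤ k.toNat ∧ (pvWin cs left r).count (cs.getD r ' ') = 0) := by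
    unfold pvGood
    rw [hw, List.nodup_append]
    constructor
    · rintro ⟨hs, _, _, hdis⟩
      exact ⟨hs, List.count_eq_zero.2 fun hm => hdis _ hm _ (List.mem_singleton_self _) rfl⟩
    · rintro ⟨hs, hc0⟩
      refine ⟨hs, hnd, List.nodup_singleton _, fun a ha b hb => ?_⟩
      rw [List.mem_singleton] at hb
      subst hb
      exact fun he => (List.count_eq_zero.1 hc0) (he ▸ ha)
  rw [hfreq (cs.getD r ' '), hcount, hg]
  omega

lemma pvShrink_spec (cs : List Char) (k : Int) (hk : 1 ≤ k) (r : Nat) (hr : r < cs.length) :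
    ∀ fuel left freq, left ≤ r → r + 1 - left ≤ fuel →
    (pvWin cs left r).Nodup →
    (∀ c, PySem.Dict.getD freq c 0 = ((pvWin cs left (r + 1)).count c : Int)) →
    (∀ l, l < left → ¬ pvGood cs k.toNat l (r + 1)) →
    left ≤ (kLengthShrink fuel cs k r freq left).2 ∧
    (kLengthShrink fuel cs k r freq left).2 ≤ r ∧
    pvGood cs k.toNat (kLengthShrink fuel cs k r freq left).2 (r + 1) ∧
    (∀ l, l < (kLengthShrink fuel cs k r freq left).2 → ¬ pvGood cs k.toNat l (r + 1)) ∧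
    (∀ c, PySem.Dict.getD (kLengthShrink fuel cs k r freq left).1 c 0 =
      ((pvWin cs (kLengthShrink fuel cs k r freq left).2 (r + 1)).count c : Int)) := by
  intro fuel
  induction fuel with
  | zero => intro left freq hlr hfuel _ _ _; omega
  | succ fuel ih =>
    intro left freq hlr hfuel hnd hfreq hmin
    rw [kLengthShrink]
    by_cases hcond :
        PySem.Dict.getD freq (cs.getD r ' ') 0 > 1 ∨ ((r : Int) - (left : Int) + 1 > k)
    · rw [if_pos hcond]
      have hngood : ¬ pvGood cs k.toNat left (r + 1) :=
        (pvCond_iff cs k hk r left freq hr hlr hnd hfreq).1 hcond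
      have hgoodr : pvGood cs k.toNat r (r + 1) := by
        have hwr : pvWin cs r (r + 1) = [cs.getD r ' '] := by
          have := pvWin_concat cs r r hr (le_refl r)
          simpa [pvWin] using this
        exact ⟨by omega, by rw [hwr]; exact List.nodup_singleton _⟩
      have hlt : left < r := by
        rcases Nat.lt_or_ge left r with h | h
        · exact h
        · exfalso; have : left = r := by omega
          subst this; exact hngood hgoodr
      have hconswin : pvWin cs left (r + 1) = cs.getD left ' ' :: pvWin cs (left + 1) (r + 1) :=
        pvWin_cons cs left (r + 1) (by omega) (by omega)
      have hconswin' : pvWin cs left r = cs.getD left ' ' :: pvWin cs (left + 1) r :=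
        pvWin_cons cs left r hlt (by omega)
      have hf1 : ∀ c,
          PySem.Dict.getD (freq.insert (cs.getD left ' ')
              (PySem.Dict.getD freq (cs.getD left ' ') 0 - 1)) c 0 =
            ((pvWin cs (left + 1) (r + 1)).count c : Int) := by
        intro c
        rw [PySem.Dict.getD_insert]
        by_cases hc : c = cs.getD left ' '
        · rw [if_pos hc, hfreq (cs.getD left ' '), hconswin, hc]
          push_cast [List.count_cons_self]
          ring
        · rw [if_neg hc, hfreq c, hconswin, List.count_cons]
          simp only [beq_iff_eq, if_neg (show ¬ cs.getD left ' ' = c from fun h => hc h.symm), Nat.add_zero]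
      have hf2 : ∀ c,
          PySem.Dict.getD
            (if PySem.Dict.getD (freq.insert (cs.getD left ' ')
                  (PySem.Dict.getD freq (cs.getD left ' ') 0 - 1)) (cs.getD left ' ') 0 = 0
             then (freq.insert (cs.getD left ' ')
                  (PySem.Dict.getD freq (cs.getD left ' ') 0 - 1)).erase (cs.getD left ' ')
             else freq.insert (cs.getD left ' ')
                  (PySem.Dict.getD freq (cs.getD left ' ') 0 - 1)) c 0 =
            ((pvWin cs (left + 1) (r + 1)).count c : Int) := by
        intro c
        split_ifs with h0
        · by_cases hc : c = cs.getD left ' '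
          · rw [hc, pvGetD_erase_self, ← h0, hf1 (cs.getD left ' ')]
          · rw [pvGetD_erase_of_ne _ _ _ hc, hf1 c]
        · exact hf1 c
      have hmin' : ∀ l, l < left + 1 → ¬ pvGood cs k.toNat l (r + 1) := by
        intro l hll
        rcases Nat.lt_or_ge l left with h | h
        · exact hmin l h
        · have : l = left := by omega
          subst this; exact hngood
      have hnd' : (pvWin cs (left + 1) r).Nodup := by
        rw [hconswin'] at hnd
        exact hnd.of_cons
      dsimp only
      obtain ⟨h1, h2, h3, h4, h5⟩ := ih (left + 1) _ (by omega) (by omega) hnd' hf2 hmin'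
      exact ⟨by omega, h2, h3, h4, h5⟩
    · rw [if_neg hcond]
      have hgood : pvGood cs k.toNat left (r + 1) := by
        by_contra hng
        exact hcond ((pvCond_iff cs k hk r left freq hr hlr hnd hfreq).2 hng)
      exact ⟨le_refl _, hlr, hgood, hmin, hfreq⟩

lemma pvStep_spec (cs : List Char) (k : Int) (hk : 1 ≤ k) (m left : Nat) (result : Int)
    (freq : PySem.Dict Char Int) (hm : m < cs.length) (hinv : pvInv cs k.toNat m left freq) :
    pvInv cs k.toNat (m + 1) (kLengthStep cs k (left, result, freq) m).1
      (kLengthStep cs k (left, result, freq) m).2.2 ∧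
    (kLengthStep cs k (left, result, freq) m).2.1 =
      result + (if pvValid cs k.toNat m then 1 else 0) := by
  obtain ⟨hlm, hsz, hnd, hfreq, hmin⟩ := hinv
  have hK1 : 1 ≤ k.toNat := by omega
  have hw := pvWin_concat cs left m hm hlm
  have hf1 : ∀ c,
      PySem.Dict.getD (freq.insert (cs.getD m ' ')
          (PySem.Dict.getD freq (cs.getD m ' ') 0 + 1)) c 0 =
        ((pvWin cs left (m + 1)).count c : Int) := by
    intro c
    rw [PySem.Dict.getD_insert, hw, List.count_append]
    by_cases hc : c = cs.getD m ' '
    · rw [if_pos hc, hfreq (cs.getD m ' '), hc]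
      have h1 : List.count (cs.getD m ' ') [cs.getD m ' '] = 1 := by simp
      rw [h1]; push_cast; omega
    · rw [if_neg hc, hfreq c]
      have h1 : List.count c [cs.getD m ' '] = 0 := by
        rw [List.count_eq_zero]
        simpa using hc
      rw [h1]; push_cast; omega
  have hmin1 : ∀ l, l < left → ¬ pvGood cs k.toNat l (m + 1) := by
    intro l hl hgood
    obtain ⟨hg1, hg2⟩ := hgood
    apply hmin l hl
    refine ⟨by omega, ?_⟩
    have hwl := pvWin_concat cs l m hm (by omega)
    rw [hwl] at hg2
    exact (List.nodup_append.1 hg2).1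
  obtain ⟨hs1, hs2, hs3, hs4, hs5⟩ :=
    pvShrink_spec cs k hk m hm (cs.length + 1) left
      (freq.insert (cs.getD m ' ') (PySem.Dict.getD freq (cs.getD m ' ') 0 + 1))
      hlm (by omega) hnd hf1 hmin1
  unfold kLengthStep
  dsimp only
  revert hs1 hs2 hs3 hs4 hs5
  generalize kLengthShrink (cs.length + 1) cs k m
      (freq.insert (cs.getD m ' ') (PySem.Dict.getD freq (cs.getD m ' ') 0 + 1)) left = p
  obtain ⟨freq', left'⟩ := p
  intro hs1 hs2 hs3 hs4 hs5
  dsimp only at hs1 hs2 hs3 hs4 hs5 ⊢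
  refine ⟨⟨by omega, hs3.1, hs3.2, hs5, hs4⟩, ?_⟩
  have hiff : ((m : Int) - (left' : Int) + 1 = k) ↔ (pvValid cs k.toNat m = true) := by
    unfold pvValid
    simp only [Bool.and_eq_true, decide_eq_true_eq]
    constructor
    · intro he
      have hp2 : left' = m + 1 - k.toNat := by omega
      refine ⟨by omega, ?_⟩
      rw [← hp2]
      exact hs3.2
    · rintro ⟨hKm, hnd'⟩
      have hgood : pvGood cs k.toNat (m + 1 - k.toNat) (m + 1) := ⟨by omega, hnd'⟩
      have hle : left' ≤ m + 1 - k.toNat := by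
        by_contra hgt
        exact hs4 (m + 1 - k.toNat) (by omega) hgood
      have hub := hs3.1
      omega
  rw [if_congr hiff rfl rfl]
  by_cases hv : pvValid cs k.toNat m = true
  · simp [hv]
  · simp [hv]

lemma pvLoop_spec (cs : List Char) (k : Int) (hk : 1 ≤ k) :
    ∀ cnt m left result freq, m + cnt = cs.length → pvInv cs k.toNat m left freq →
    ((List.range' m cnt).foldl (kLengthStep cs k) (left, result, freq)).2.1 =
      result + ((List.range' m cnt).countP (pvValid cs k.toNat) : Int) := by
  intro cnt
  induction cnt with
  | zero => intro m left result freq _ _; simp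
  | succ cnt ih =>
    intro m left result freq hlen hinv
    rw [List.range'_succ, List.foldl_cons, List.countP_cons]
    obtain ⟨hinv', hres⟩ := pvStep_spec cs k hk m left result freq (by omega) hinv
    have hsplit : kLengthStep cs k (left, result, freq) m =
        ((kLengthStep cs k (left, result, freq) m).1,
         (kLengthStep cs k (left, result, freq) m).2.1,
         (kLengthStep cs k (left, result, freq) m).2.2) := rfl
    rw [hsplit, ih (m + 1) _ _ _ (by omega) hinv', hres]
    push_cast
    split_ifs <;> ring

lemma pvA_eq_count (cs : List Char) (k : Int) (hk : 1 ≤ k) :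
    ((List.range cs.length).foldl (kLengthStep cs k) (0, 0, PySem.Dict.empty)).2.1 =
      ((List.range cs.length).countP (pvValid cs k.toNat) : Int) := by
  rw [List.range_eq_range']
  rw [pvLoop_spec cs k hk cs.length 0 0 0 PySem.Dict.empty (by omega) ?_]
  · ring
  · refine ⟨le_refl 0, by omega, by simp [pvWin], ?_, fun l hl => absurd hl (by omega)⟩
    intro c
    simp [pvWin, PySem.Dict.getD_empty]

lemma pvSet_length_eq_iff (w : List Char) :
    (PySem.Set.ofList w).length = w.length ↔ w.Nodup := by
  constructor
  · intro h
    induction w with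
    | nil => exact List.nodup_nil
    | cons x xs ih =>
        rw [PySem.Set.ofList_cons] at h
        simp only [List.length_cons] at h
        have hle : (PySem.Set.ofList xs).length ≤ xs.length := PySem.Set.length_ofList_le xs
        have hd : ((PySem.Set.ofList xs).discard x).length ≤ (PySem.Set.ofList xs).length := by
          simp only [PySem.Set.discard]
          exact List.length_filter_le _ _
        have hxs : (PySem.Set.ofList xs).length = xs.length := by omega
        have hnd := ih hxs
        have hx : x ∉ xs := by
          intro hx
          have hmem : x ∈ PySem.Set.ofList xs := by
            rw [PySem.Set.mem_ofList]; exact hx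
          have : ((PySem.Set.ofList xs).discard x).length < (PySem.Set.ofList xs).length := by
            simp only [PySem.Set.discard]
            exact List.length_filter_lt_length_iff_exists.2 ⟨x, hmem, by simp⟩
          omega
        exact List.Nodup.cons hx hnd
  · intro h; rw [PySem.Set.ofList_eq_self_of_nodup w h]

lemma pvCount_shift (cs : List Char) (K : Nat) (hK : 1 ≤ K) :
    (List.range cs.length).countP (pvValid cs K) =
      (List.range (cs.length + 1 - K)).countP (pvValidB cs K) := by
  rcases Nat.lt_or_ge cs.length K with hnK | hKn
  · have h1 : (List.range cs.length).countP (pvValid cs K) = 0 := by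
      rw [List.countP_eq_zero]
      intro r hr
      rw [List.mem_range] at hr
      unfold pvValid
      simp only [Bool.and_eq_true, decide_eq_true_eq, not_and]
      intro h
      omega
    have h2 : cs.length + 1 - K = 0 := by omega
    rw [h1, h2]
    rfl
  · conv_lhs =>
      rw [List.range_eq_range',
        show cs.length = (K - 1) + (cs.length + 1 - K) by omega,
        ← List.range'_append (s := 0) (m := K - 1) (n := cs.length + 1 - K) (step := 1)]
    rw [List.countP_append]
    have h1 : (List.range' 0 (K - 1)).countP (pvValid cs K) = 0 := by
      rw [List.countP_eq_zero]
      intro r hr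
      rw [List.mem_range'_1] at hr
      unfold pvValid
      simp only [Bool.and_eq_true, decide_eq_true_eq, not_and]
      intro h
      omega
    have h2 : (List.range' (0 + 1 * (K - 1)) (cs.length + 1 - K)).countP (pvValid cs K) =
        (List.range (cs.length + 1 - K)).countP (pvValidB cs K) := by
      rw [List.range'_eq_map_range, List.countP_map]
      apply List.countP_congr
      intro i hi
      rw [List.mem_range] at hi
      unfold pvValid pvValidB
      simp only [Function.comp_apply]
      have e1 : 0 + 1 * (K - 1) + i + 1 - K = i := by omega
      have e2 : 0 + 1 * (K - 1) + i + 1 = i + K := by omega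
      rw [e1, e2]
      simp
    rw [h1, h2]
    omega

-- B's fold equals a guarded countP over all start positions
lemma pvB_eq_count (cs : List Char) (k : Int) (hk : 1 ≤ k) :
    ((PySem.List.pyRange 0 (cs.length : Int) 1).foldl
      (fun count i =>
        if i + k ≤ (cs.length : Int) ∧
           ((PySem.Set.ofList (PySem.List.slice cs (some i) (some (i + k)))).length : Int) = k
        then count + 1 else count) 0) =
      ((List.range cs.length).countP
        (fun (i : Nat) => decide ((i : Int) + k ≤ (cs.length : Int)) && pvValidB cs k.toNat i) : Int) := by
  rw [PySem.List.pyRange_one, List.foldl_map]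
  rw [show (((cs.length : Int)) - 0).toNat = cs.length by omega]
  have hcnt := PySem.List.foldl_count_if
    (p := fun i : Nat =>
      decide (((0 : Int) + (i : Int) + k ≤ (cs.length : Int)) ∧
        ((PySem.Set.ofList (PySem.List.slice cs (some ((0 : Int) + (i : Int)))
          (some ((0 : Int) + (i : Int) + k)))).length : Int) = k))
    (List.range cs.length) 0
  simp only [decide_eq_true_eq] at hcnt
  rw [hcnt, zero_add]
  congr 1
  apply List.countP_congr
  intro i hi
  rw [List.mem_range] at hi
  by_cases hg : (i : Int) + k ≤ (cs.length : Int)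
  · have hslice : PySem.List.slice cs (some ((0 : Int) + (i : Int)))
        (some ((0 : Int) + (i : Int) + k)) = pvWin cs i (i + k.toNat) := by
      rw [PySem.List.slice_toNat cs (by omega) (by omega)]
      unfold pvWin
      have e1 : ((0 : Int) + (i : Int)).toNat = i := by omega
      have e2 : ((0 : Int) + (i : Int) + k).toNat = i + k.toNat := by omega
      rw [e1, e2]
    have hwlen : (pvWin cs i (i + k.toNat)).length = k.toNat := by
      rw [pvWin_length]
      omega
    unfold pvValidB
    rw [hslice]
    by_cases hnd : (pvWin cs i (i + k.toNat)).Nodup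
    · have := PySem.Set.ofList_eq_self_of_nodup _ hnd
      simp [this, hwlen, hnd, hg]
      omega
    · have hne : (PySem.Set.ofList (pvWin cs i (i + k.toNat))).length ≠ k.toNat := by
        intro he
        exact hnd ((pvSet_length_eq_iff _).1 (by omega))
      simp [hnd, hg]
      omega
  · have h0 : ¬ ((0 : Int) + (i : Int) + k ≤ (cs.length : Int)) := by omega
    simp [hg]

-- the guard cuts the start range down from len(s) to len(s)+1-K
lemma pvGuard_count (cs : List Char) (k : Int) (hk : 1 ≤ k) :
    (List.range cs.length).countP
      (fun (i : Nat) => decide ((i : Int) + k ≤ (cs.length : Int)) && pvValidB cs k.toNat i) =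
      (List.range (cs.length + 1 - k.toNat)).countP (pvValidB cs k.toNat) := by
  rcases Nat.lt_or_ge cs.length k.toNat with hnK | hKn
  · have h2 : cs.length + 1 - k.toNat = 0 := by omega
    rw [h2]
    simp only [List.range_zero, List.countP_nil]
    rw [List.countP_eq_zero]
    intro i hi
    rw [List.mem_range] at hi
    have : ¬ ((i : Int) + k ≤ (cs.length : Int)) := by omega
    simp [this]
  · have hmn : cs.length + 1 - k.toNat + (k.toNat - 1) = cs.length := by omega
    have hsplit : List.range cs.length =
        List.range (cs.length + 1 - k.toNat) ++
          List.range' (cs.length + 1 - k.toNat) (k.toNat - 1) := by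
      rw [List.range_eq_range', List.range_eq_range']
      conv_lhs => rw [← hmn]
      rw [← List.range'_append (s := 0) (m := cs.length + 1 - k.toNat) (n := k.toNat - 1)
        (step := 1)]
      norm_num
    rw [hsplit, List.countP_append]
    have h1 : (List.range (cs.length + 1 - k.toNat)).countP
        (fun (i : Nat) => decide ((i : Int) + k ≤ (cs.length : Int)) && pvValidB cs k.toNat i) =
        (List.range (cs.length + 1 - k.toNat)).countP (pvValidB cs k.toNat) := by
      apply List.countP_congr
      intro i hi
      rw [List.mem_range] at hi
      have : (i : Int) + k ≤ (cs.length : Int) := by omega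
      simp [this]
    have h2 : (List.range' (cs.length + 1 - k.toNat) (k.toNat - 1)).countP
        (fun (i : Nat) => decide ((i : Int) + k ≤ (cs.length : Int)) && pvValidB cs k.toNat i) = 0 := by
      rw [List.countP_eq_zero]
      intro i hi
      rw [List.mem_range'_1] at hi
      have : ¬ ((i : Int) + k ≤ (cs.length : Int)) := by omega
      simp [this]
    rw [h1, h2]
    omega

-- ===== VERDICT (by name: the statements are the Claim_ definitions above) =====
theorem kLengthString_spec : Claim_equal_kLengthString := by
  intro s k _ hkP
  rcases (hkP : 1 ≤ k ∨ s = "") with hk | hs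
  · unfold Spec_kLengthString kLengthString kLengthString_alt
    rw [pvA_eq_count s.toList k hk, pvCount_shift s.toList k.toNat (by omega),
      pvB_eq_count s.toList k hk, pvGuard_count s.toList k hk]
  · subst hs
    unfold Spec_kLengthString kLengthString kLengthString_alt
    rfl
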